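-- pv_equiv track=rewrite | github.com/Abhishekkumar03012001/UserActivityTracker | Final code.py | detect_open_documents
-- ===== SOURCE A (Python) =====
-- def detect_open_documents(process_list):
--     doc_types = {
--         'Word': ['winword'], 'Excel': ['excel'], 'PowerPoint': ['powerpnt'],
--         'PDF Reader': ['acrord32', 'foxit', 'pdf'], 'Notepad': ['notepad'],
--         'VSCode': ['code'], 'Notepad++': ['notepad++']
--     }
--     open_docs = []
--     for name, keywords in doc_types.items():
--         if any(any(k in proc.lower() for k in keywords) for proc in process_list):
--             open_docs.append(name)
--     return open_docs
-- ===== SOURCE B (Python) =====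
-- DOC_TYPES = [
--     ('Word', ['winword']), ('Excel', ['excel']), ('PowerPoint', ['powerpnt']),
--     ('PDF Reader', ['acrord32', 'foxit', 'pdf']), ('Notepad', ['notepad']),
--     ('VSCode', ['code']), ('Notepad++', ['notepad++']),
-- ]
--
-- def detect_open_documents(process_list):
--     # Build ONE newline-joined lowercase haystack; since no keyword contains a
--     # newline, a keyword occurs in the haystack iff it occurs in some process.
--     haystack = "\n".join(proc.lower() for proc in process_list)
--     return [name for name, keywords in DOC_TYPES
--             if any(k in haystack for k in keywords)]
-- ===== Notes on version B (the rewrite author's own statement) =====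
-- stated objective: faster
-- what changed: Replaces the per-type rescan of the process list by a multi-pattern search against a single haystack: all process names are lowercased once and joined with a newline separator (which no keyword can contain), so each keyword is tested by one substring probe of that haystack instead of lowering and probing every process per keyword.
import Mathlib
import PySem

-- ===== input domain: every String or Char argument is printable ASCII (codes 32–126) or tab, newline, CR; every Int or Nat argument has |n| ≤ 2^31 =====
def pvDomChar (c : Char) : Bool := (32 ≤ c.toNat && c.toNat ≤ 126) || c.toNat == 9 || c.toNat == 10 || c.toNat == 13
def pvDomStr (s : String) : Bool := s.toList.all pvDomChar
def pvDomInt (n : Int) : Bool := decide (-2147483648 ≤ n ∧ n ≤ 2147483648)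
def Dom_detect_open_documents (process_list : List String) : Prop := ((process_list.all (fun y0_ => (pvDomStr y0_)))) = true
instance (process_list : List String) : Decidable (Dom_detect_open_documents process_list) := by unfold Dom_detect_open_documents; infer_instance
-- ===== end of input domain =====

-- B replaces A's per-type rescan of the process list by one multi-pattern search: the
-- process names are lowercased once and joined into a single newline-separated haystack
-- (no keyword contains a newline), then each keyword is tested once against the haystack;
-- objective: alternative algorithm, same return value.

-- the doc_types table (shared literal data)
def pvDocTypes : List (String × List String) :=
  [("Word", ["winword"]), ("Excel", ["excel"]), ("PowerPoint", ["powerpnt"]),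
   ("PDF Reader", ["acrord32", "foxit", "pdf"]), ("Notepad", ["notepad"]),
   ("VSCode", ["code"]), ("Notepad++", ["notepad++"])]

-- ===== PORT A =====
def detect_open_documents (process_list : List String) : List String :=
  pvDocTypes.foldl
    (fun open_docs p =>
      if process_list.any (fun proc => p.2.any (fun k => PySem.Str.isIn k (PySem.Str.lower proc)))
      then open_docs ++ [p.1] else open_docs) []

-- ===== PORT B =====
def detect_open_documents_alt (process_list : List String) : List String :=
  let haystack := PySem.Str.join "\n" (process_list.map (fun proc => PySem.Str.lower proc))
  pvDocTypes.foldl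
    (fun acc p =>
      if p.2.any (fun k => PySem.Str.isIn k haystack) then acc ++ [p.1] else acc) []

-- ===== PRECONDITION & SPEC =====
def Spec_detect_open_documents (process_list : List String) (out : List String) : Prop := out = detect_open_documents_alt process_list
instance (process_list : List String) (out : List String) : Decidable (Spec_detect_open_documents process_list out) := by unfold Spec_detect_open_documents; infer_instance

-- ===== CLAIM (what is proved, stated in full; the proofs are below) =====
def Claim_equal_detect_open_documents : Prop := ∀ (process_list : List String), Dom_detect_open_documents process_list → Spec_detect_open_documents process_list (detect_open_documents process_list)

-- ===== LEMMAS AND PROOFS =====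

-- a prefix of a ++ sep :: b that avoids sep is a prefix of a
theorem pv_prefix_sep {k a b : List Char} {sep : Char} (hsep : sep ∉ k)
    (h : k <+: a ++ sep :: b) : k <+: a := by
  by_cases hl : k.length ≤ a.length
  · have hk := List.prefix_iff_eq_take.mp h
    rw [List.take_append_of_le_length hl] at hk
    exact hk ▸ List.take_prefix _ _
  · exfalso
    have hi : a.length < k.length := Nat.lt_of_not_le hl
    have hj : a.length < (a ++ sep :: b).length := by simp
    have hg := List.IsPrefix.getElem h hi
    have : (a ++ sep :: b)[a.length] = sep := by
      simp [List.getElem_append_right (Nat.le_refl a.length)]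
    exact hsep (this ▸ hg ▸ List.getElem_mem hi)

-- an infix of a ++ sep :: b that avoids sep is an infix of a or of b
theorem pv_infix_sep {k a b : List Char} {sep : Char} (hsep : sep ∉ k) :
    k <:+: a ++ sep :: b ↔ k <:+: a ∨ k <:+: b := by
  constructor
  · induction a with
    | nil =>
      intro h
      rcases List.infix_cons_iff.mp h with hp | hi
      · left
        have : k <+: ([] : List Char) := pv_prefix_sep (a := []) hsep hp
        simpa using this.isInfix
      · exact Or.inr hi
    | cons x a ih =>
      intro h
      rcases List.infix_cons_iff.mp h with hp | hi
      · exact Or.inl (pv_prefix_sep (a := x :: a) hsep hp).isInfix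
      · rcases ih hi with h1 | h2
        · exact Or.inl (List.infix_cons h1)
        · exact Or.inr h2
  · rintro (h | h)
    · exact h.trans (List.prefix_append a (sep :: b)).isInfix
    · exact h.trans ((List.suffix_cons sep b).trans (List.suffix_append a (sep :: b))).isInfix

-- a nonempty keyword without newline occurs in the '\n'-joined list iff it occurs in some piece
theorem pv_isIn_join {k : List Char} (hne : k ≠ []) (hsep : '\n' ∉ k) (ls : List (List Char)) :
    PySem.Chars.isIn k (PySem.Chars.join ['\n'] ls) = ls.any (fun l => PySem.Chars.isIn k l) := by
  induction ls with
  | nil =>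
    simp only [List.any_nil]
    rw [PySem.Chars.join_nil]
    rw [PySem.Chars.isIn_eq_false_iff]
    intro h
    exact hne (List.eq_nil_of_infix_nil h)
  | cons x t ih =>
    cases t with
    | nil =>
      rw [PySem.Chars.join_singleton]
      simp
    | cons y t' =>
      rw [PySem.Chars.join_cons_cons]
      rw [Bool.eq_iff_iff, PySem.Chars.isIn_iff_infix]
      have : x ++ ['\n'] ++ PySem.Chars.join ['\n'] (y :: t') =
          x ++ '\n' :: PySem.Chars.join ['\n'] (y :: t') := by simp
      rw [this, pv_infix_sep hsep]
      rw [← PySem.Chars.isIn_iff_infix, ← PySem.Chars.isIn_iff_infix, ih]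
      simp

-- every keyword of the table is nonempty and newline-free
theorem pv_keywords_ok : ∀ p ∈ pvDocTypes, ∀ k ∈ p.2, k.toList ≠ [] ∧ '\n' ∉ k.toList := by
  decide

-- a keyword hits the joined lowered haystack iff it hits some lowered process name
theorem pv_isIn_haystack (k : String) (hne : k.toList ≠ []) (hsep : '\n' ∉ k.toList)
    (pl : List String) :
    PySem.Str.isIn k (PySem.Str.join "\n" (pl.map (fun proc => PySem.Str.lower proc)))
      = pl.any (fun proc => PySem.Str.isIn k (PySem.Str.lower proc)) := by
  have h1 : PySem.Str.isIn k (PySem.Str.join "\n" (pl.map (fun proc => PySem.Str.lower proc)))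
      = PySem.Chars.isIn k.toList
          (PySem.Chars.join "\n".toList ((pl.map (fun proc => PySem.Str.lower proc)).map String.toList)) := by
    simp [PySem.Str.isIn, PySem.Str.toList_join]
  rw [h1]
  have h2 : "\n".toList = ['\n'] := rfl
  rw [h2, pv_isIn_join hne hsep]
  simp [PySem.Str.isIn, Function.comp_def, PySem.Str.toList_lower]

-- ===== VERDICT (by name: the statement is the Claim_ definition above) =====
theorem detect_open_documents_spec : Claim_equal_detect_open_documents := by
  intro pl _
  unfold Spec_detect_open_documents
  simp only [detect_open_documents, detect_open_documents_alt]
  refine (PySem.List.foldl_congr_mem _ _ _ _ ?_).symm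
  intro acc p hp
  have hcond : p.2.any (fun k =>
        PySem.Str.isIn k (PySem.Str.join "\n" (pl.map (fun proc => PySem.Str.lower proc))))
      = pl.any (fun proc => p.2.any (fun k => PySem.Str.isIn k (PySem.Str.lower proc))) := by
    have hk : ∀ k ∈ p.2,
        PySem.Str.isIn k (PySem.Str.join "\n" (pl.map (fun proc => PySem.Str.lower proc)))
          = pl.any (fun proc => PySem.Str.isIn k (PySem.Str.lower proc)) := by
      intro k hkmem
      obtain ⟨hne, hsep⟩ := pv_keywords_ok p hp k hkmem
      exact pv_isIn_haystack k hne hsep pl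
    rw [Bool.eq_iff_iff, List.any_eq_true, List.any_eq_true]
    constructor
    · rintro ⟨k, hkm, hkin⟩
      rw [hk k hkm, List.any_eq_true] at hkin
      rcases hkin with ⟨proc, hpm, hin⟩
      exact ⟨proc, hpm, List.any_eq_true.mpr ⟨k, hkm, hin⟩⟩
    · rintro ⟨proc, hpm, hin⟩
      rcases List.any_eq_true.mp hin with ⟨k, hkm, hkin⟩
      refine ⟨k, hkm, ?_⟩
      rw [hk k hkm, List.any_eq_true]
      exact ⟨proc, hpm, hkin⟩
  rw [hcond]
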